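-- pv_equiv track=rewrite | github.com/seonjaechoi0307/TIL | Self-Study/Code_Test/School_Programers_Traning/2023-11-28.py | solution
-- ===== SOURCE A (Python) =====
-- def solution(arr):
--
--     # 솔루션 정의
--     # 정수 배열 arr가 주어집니다. arr를 이용해 새로운 배열 stk를 만드려고 합니다.
--
--     # 변수 i를 만들어 초기값을 0으로 설정한 후 i가 arr의 길이보다 작으면 다음 작업을 반복합니다.
--
--     # 만약 stk가 빈 배열이라면 arr[i]를 stk에 추가하고 i에 1을 더합니다.
--     # stk에 원소가 있고, stk의 마지막 원소가 arr[i]보다 작으면 arr[i]를 stk의 뒤에 추가하고 i에 1을 더합니다.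
--     # stk에 원소가 있는데 stk의 마지막 원소가 arr[i]보다 크거나 같으면 stk의 마지막 원소를 stk에서 제거합니다.
--     # 위 작업을 마친 후 만들어진 stk를 return 하는 solution 함수를 완성해 주세요.
--
--     i = 0
--     stk = []
--
--     while i < len(arr) :
--
--         if not stk :
--             stk.append(arr[i])
--             i += 1
--
--         elif stk[-1] < arr[i] :
--             stk.append(arr[i])
--             i += 1
--
--         elif stk[-1] >= arr[i] :
--             del stk[-1]
--
--     return stk
-- ===== SOURCE B (Python) =====
-- def solution(arr):
--     # Different algorithm: the surviving elements are exactly those strictly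
--     # smaller than every element after them, i.e. the strict suffix-minima.
--     # One reverse pass tracking the running minimum; no stack, no pops.
--     out = []
--     m = None
--     for x in reversed(arr):
--         if m is None or x < m:
--             out.append(x)
--             m = x
--     out.reverse()
--     return out
-- ===== Notes on version B (the rewrite author's own statement) =====
-- stated objective: alternative
-- what changed: Replaces the push/pop monotonic-stack simulation with a single reverse pass collecting the strict suffix-minima (elements strictly smaller than every later element), which is exactly the final stack; no stack and no pops at all.
import Mathlib
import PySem

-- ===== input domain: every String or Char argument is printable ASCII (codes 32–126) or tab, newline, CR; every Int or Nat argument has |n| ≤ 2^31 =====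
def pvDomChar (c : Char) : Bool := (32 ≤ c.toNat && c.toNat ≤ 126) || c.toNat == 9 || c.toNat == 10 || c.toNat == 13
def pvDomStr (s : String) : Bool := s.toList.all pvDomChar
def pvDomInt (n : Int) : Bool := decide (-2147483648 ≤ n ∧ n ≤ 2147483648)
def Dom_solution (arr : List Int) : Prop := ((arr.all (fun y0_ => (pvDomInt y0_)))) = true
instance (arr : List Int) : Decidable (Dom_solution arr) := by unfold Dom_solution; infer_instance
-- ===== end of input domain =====

-- B computes the same result by a different algorithm: one reverse pass collecting strict
-- suffix-minima (no stack, no pops), proved equal to A's push/pop stack simulation.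
-- ===== PORT A =====
-- A walks arr with an index i; on a pop it does not advance i (rewind pattern).
def solutionLoop (arr : List Int) (i : Nat) (stk : List Int) : List Int :=
  if h : i < arr.length then
    if hs : stk = [] then
      solutionLoop arr (i + 1) (stk ++ [arr[i]])
    else if stk.getLast hs < arr[i] then
      solutionLoop arr (i + 1) (stk ++ [arr[i]])
    else
      solutionLoop arr i stk.dropLast
  else stk
termination_by 2 * (arr.length - i) + stk.length
decreasing_by
  · simp; omega
  · simp; omega
  · have : stk.length ≠ 0 := by simpa [List.length_eq_zero_iff] using hs
    simp [List.length_dropLast]; omega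

def solution (arr : List Int) : List Int := solutionLoop arr 0 []

-- ===== PORT B =====
-- `for x in reversed(arr): if m is None or x < m: out.append(x); m = x`
def revStep (s : List Int × Option Int) (x : Int) : List Int × Option Int :=
  match s.2 with
  | none => (s.1 ++ [x], some x)
  | some m => if x < m then (s.1 ++ [x], some x) else s

def solution_alt (arr : List Int) : List Int :=
  ((arr.reverse.foldl revStep ([], none)).1).reverse

-- ===== PRECONDITION & SPEC =====
def Spec_solution (arr : List Int) (out : List Int) : Prop := out = solution_alt arr
instance (arr : List Int) (out : List Int) : Decidable (Spec_solution arr out) := by unfold Spec_solution; infer_instance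

-- ===== CLAIM (what is proved, stated in full; the proofs are below) =====
def Claim_equal_solution : Prop := ∀ (arr : List Int), Dom_solution arr → Spec_solution arr (solution arr)

-- ===== LEMMAS AND PROOFS =====

-- What A's while-loop does when the index does not advance: pop all tops ≥ x.
def popGE (stk : List Int) (x : Int) : List Int :=
  if hs : stk = [] then stk
  else if stk.getLast hs ≥ x then popGE stk.dropLast x
  else stk
termination_by stk.length
decreasing_by
  have : stk.length ≠ 0 := by simpa [List.length_eq_zero_iff] using hs
  simp [List.length_dropLast]; omega

-- kept elements (scanning the reversed array) below a running minimum m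
def keepB : List Int → Int → List Int
  | [], _ => []
  | x :: xs, m => if x < m then x :: keepB xs x else keepB xs m

-- full kept list of the reversed array (no initial minimum)
def K : List Int → List Int
  | [] => []
  | x :: xs => x :: keepB xs x

lemma popGE_nil (x : Int) : popGE [] x = [] := by
  rw [popGE]; simp

lemma popGE_concat (r : List Int) (y x : Int) :
    popGE (r ++ [y]) x = if x ≤ y then popGE r x else r ++ [y] := by
  rw [popGE]
  have h : r ++ [y] ≠ [] := by simp
  simp only [dif_neg h, List.getLast_append, List.dropLast_concat, ge_iff_le]
  simp

lemma popGE_of_lt (stk : List Int) (x : Int) (hs : stk ≠ []) (h : stk.getLast hs < x) :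
    popGE stk x = stk := by
  rw [popGE]; simp [hs]; omega

lemma popGE_of_ge (stk : List Int) (x : Int) (hs : stk ≠ []) (h : stk.getLast hs ≥ x) :
    popGE stk x = popGE stk.dropLast x := by
  rw [popGE]; simp [hs, h]

lemma solutionLoop_eq (arr : List Int) (i : Nat) (stk : List Int) :
    solutionLoop arr i stk = (arr.drop i).foldl (fun s x => popGE s x ++ [x]) stk := by
  induction i, stk using solutionLoop.induct arr with
  | case1 i h ih =>
    rw [solutionLoop, dif_pos h, dif_pos rfl, ih, List.drop_eq_getElem_cons h]
    simp only [List.foldl_cons, List.nil_append, popGE_nil]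
  | case2 i stk h hs hlt ih =>
    rw [solutionLoop, dif_pos h, dif_neg hs, if_pos hlt, ih, List.drop_eq_getElem_cons h]
    rw [List.foldl_cons, popGE_of_lt stk arr[i] hs hlt]
  | case3 i stk h hs hlt ih =>
    have hge : stk.getLast hs ≥ arr[i] := by omega
    rw [solutionLoop, dif_pos h, dif_neg hs, if_neg hlt, ih, List.drop_eq_getElem_cons h]
    rw [List.foldl_cons, List.foldl_cons, popGE_of_ge stk arr[i] hs hge]
  | case4 i stk h =>
    rw [solutionLoop, dif_neg h]
    have hnil : arr.drop i = [] := List.drop_eq_nil_of_le (by omega)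
    rw [hnil, List.foldl_nil]

-- popping all tops ≥ x from the kept-below-y stack is re-scanning with the tighter bound x
lemma popGE_keepB (ys : List Int) : ∀ (y x : Int), x ≤ y →
    popGE ((keepB ys y).reverse) x = (keepB ys x).reverse := by
  induction ys with
  | nil => intro y x _; simp [keepB, popGE_nil]
  | cons z zs ih =>
    intro y x hxy
    by_cases hz : z < y
    · rw [keepB, if_pos hz]
      simp only [List.reverse_cons]
      rw [popGE_concat]
      by_cases hzx : x ≤ z
      · rw [if_pos hzx, ih z x hzx, keepB, if_neg (by omega)]
      · rw [if_neg hzx, keepB, if_pos (by omega), List.reverse_cons]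
    · rw [keepB, if_neg hz, ih y x hxy, keepB, if_neg (by omega)]

lemma popGE_K (l : List Int) (x : Int) :
    popGE ((K l).reverse) x = (keepB l x).reverse := by
  cases l with
  | nil => simp [K, keepB, popGE_nil]
  | cons y ys =>
    rw [K]
    simp only [List.reverse_cons]
    rw [popGE_concat]
    by_cases hxy : x ≤ y
    · rw [if_pos hxy, popGE_keepB ys y x hxy, keepB, if_neg (by omega)]
    · rw [if_neg hxy, keepB, if_pos (by omega), List.reverse_cons]

-- A's stack equals the reversed kept list of the reversed array
lemma foldA_eq (arr : List Int) :
    arr.foldl (fun s x => popGE s x ++ [x]) [] = (K arr.reverse).reverse := by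
  induction arr using List.reverseRecOn with
  | nil => simp [K]
  | append_singleton ys x ih =>
    rw [List.foldl_append, List.foldl_cons, List.foldl_nil, ih, popGE_K]
    simp only [List.reverse_append, List.reverse_cons, List.reverse_nil, List.nil_append,
      List.singleton_append]
    rw [K, List.reverse_cons]

-- B's fold with a running minimum computes keepB
lemma scan_some (xs : List Int) : ∀ (out : List Int) (m : Int),
    xs.foldl revStep (out, some m) = (out ++ keepB xs m, some (xs.foldl min m)) := by
  induction xs with
  | nil => intro out m; simp [keepB]
  | cons x xs ih =>
    intro out m
    rw [List.foldl_cons, revStep]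
    by_cases h : x < m
    · simp only [if_pos h]
      rw [ih, keepB, if_pos h, List.foldl_cons]
      have : min m x = x := min_eq_right (le_of_lt h)
      rw [this]; simp
    · simp only [if_neg h]
      rw [ih, keepB, if_neg h, List.foldl_cons]
      have : min m x = m := min_eq_left (by omega)
      rw [this]

lemma alt_eq_K (arr : List Int) : solution_alt arr = (K arr.reverse).reverse := by
  unfold solution_alt
  cases h : arr.reverse with
  | nil => simp [K]
  | cons x xs =>
    rw [List.foldl_cons]
    show ((xs.foldl revStep ([] ++ [x], some x)).1).reverse = _
    rw [scan_some, K]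
    simp

-- ===== VERDICT =====
theorem solution_spec : Claim_equal_solution := by
  intro arr _
  unfold Spec_solution solution
  rw [solutionLoop_eq, List.drop_zero, foldA_eq, alt_eq_K]
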